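-- pv_equiv track=rewrite | github.com/Sanc1i/AdventOfCode2025 | 4/gif.py | checkNeighboor
-- ===== SOURCE A (Python) =====
-- DISTANCE = 1
--
-- def checkNeighboor(dataset, x, y):
--     total = -1
--     # Note: dataset is a list of lists here
--     rows = len(dataset)
--     cols = len(dataset[0])
--
--     for i in range(-DISTANCE, DISTANCE + 1):
--         for j in range(-DISTANCE, DISTANCE + 1):
--             # Safe boundary check
--             if (0 <= (x + i) < cols) and (0 <= (y + j) < rows):
--                 total += dataset[y + j][x + i]
--     return total
-- ===== SOURCE B (Python) =====
-- def checkNeighboor(dataset, x, y):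
--     rows, cols = len(dataset), len(dataset[0])
--     y0, y1 = max(0, y - 1), min(rows, max(0, y + 2))
--     x0, x1 = max(0, x - 1), min(cols, max(0, x + 2))
--     return sum(sum(row[x0:x1]) for row in dataset[y0:y1]) - 1
-- ===== Notes on version B (the rewrite author's own statement) =====
-- stated objective: simpler
-- what changed: Replaces the 9-iteration double loop with per-cell bounds tests by computing the clamped window bounds once and summing row slices of the grid slice, visiting only in-range cells.
import Mathlib
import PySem

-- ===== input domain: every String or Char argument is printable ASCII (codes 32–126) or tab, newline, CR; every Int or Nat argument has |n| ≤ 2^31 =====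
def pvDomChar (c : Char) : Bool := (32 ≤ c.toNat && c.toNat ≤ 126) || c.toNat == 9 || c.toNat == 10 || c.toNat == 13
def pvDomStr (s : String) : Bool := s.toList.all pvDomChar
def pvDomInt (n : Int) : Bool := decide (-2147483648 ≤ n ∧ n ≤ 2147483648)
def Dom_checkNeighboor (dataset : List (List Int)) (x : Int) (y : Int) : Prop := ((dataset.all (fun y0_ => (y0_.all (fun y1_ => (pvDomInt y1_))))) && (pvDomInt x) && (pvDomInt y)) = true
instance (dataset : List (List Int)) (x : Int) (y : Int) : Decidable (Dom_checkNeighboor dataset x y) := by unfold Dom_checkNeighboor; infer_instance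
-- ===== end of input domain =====

-- B computes A's 3x3-window sum minus 1 by clamping the window bounds once and summing row
-- slices of a grid slice, instead of A's nine per-cell bounds-checked probes (objective: simpler).


-- ===== PORT A =====
def checkNeighboor (dataset : List (List Int)) (x : Int) (y : Int) : Int :=
  let rows : Int := dataset.length
  let cols : Int := (dataset.headD []).length   -- len(dataset[0]); dataset ≠ [] by Pre_
  (PySem.List.pyRange (-1) 2 1).foldl (fun total i =>
    (PySem.List.pyRange (-1) 2 1).foldl (fun total j =>
      if 0 ≤ x + i ∧ x + i < cols ∧ 0 ≤ y + j ∧ y + j < rows then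
        total + PySem.List.pyGetD (PySem.List.pyGetD dataset (y + j) []) (x + i) 0
      else total) total) (-1)

-- ===== PORT B =====
def checkNeighboor_alt (dataset : List (List Int)) (x : Int) (y : Int) : Int :=
  let rows : Int := dataset.length
  let cols : Int := (dataset.headD []).length   -- len(dataset[0]); dataset ≠ [] by Pre_
  let y0 := max 0 (y - 1)
  let y1 := min rows (max 0 (y + 2))
  let x0 := max 0 (x - 1)
  let x1 := min cols (max 0 (x + 2))
  (PySem.List.slice dataset (some y0) (some y1)).foldl
    (fun acc row => acc + (PySem.List.slice row (some x0) (some x1)).foldl (· + ·) 0) 0 - 1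

-- ===== PRECONDITION & SPEC =====
-- Pre_ excludes exactly the inputs on which A raises IndexError: the empty dataset (dataset[0])
-- and ragged grids in which the clamped 3x3 window actually probes past the end of a short row
-- (a row whose index is within 1 of y, while the nonempty clamped column window exceeds its length).
def Pre_checkNeighboor (dataset : List (List Int)) (x : Int) (y : Int) : Prop :=
  dataset ≠ [] ∧ ∀ p ∈ dataset.zipIdx,
    (y - 1 ≤ (p.2 : Int) ∧ (p.2 : Int) ≤ y + 1 ∧
      max 0 (x - 1) < min ((dataset.headD []).length : Int) (max 0 (x + 2))) →
    min ((dataset.headD []).length : Int) (max 0 (x + 2)) ≤ (p.1.length : Int)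
instance (dataset : List (List Int)) (x : Int) (y : Int) : Decidable (Pre_checkNeighboor dataset x y) := by unfold Pre_checkNeighboor; infer_instance
def pvWitness_checkNeighboor : List (List Int) × Int × Int := ([[1, 2], [3, 4]], 0, 0)
def Spec_checkNeighboor (dataset : List (List Int)) (x : Int) (y : Int) (out : Int) : Prop := out = checkNeighboor_alt dataset x y
instance (dataset : List (List Int)) (x : Int) (y : Int) (out : Int) : Decidable (Spec_checkNeighboor dataset x y out) := by unfold Spec_checkNeighboor; infer_instance

-- ===== CLAIM (what is proved, stated in full; the proofs are below) =====
def Claim_equal_checkNeighboor : Prop := ∀ (dataset : List (List Int)) (x : Int) (y : Int), Dom_checkNeighboor dataset x y → Pre_checkNeighboor dataset x y → Spec_checkNeighboor dataset x y (checkNeighboor dataset x y)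

-- ===== LEMMAS AND PROOFS =====

-- a slice with nonnegative in-range bounds is the map of getD over the index range
theorem slice_eq_map_pyRange {α : Type} (xs : List α) (d : α) (a b : Int)
    (ha : 0 ≤ a) (hb0 : 0 ≤ b) (hb : b ≤ xs.length) :
    PySem.List.slice xs (some a) (some b) =
      (PySem.List.pyRange a b 1).map (fun t => xs.getD t.toNat d) := by
  rw [PySem.List.slice_toNat xs ha hb0, PySem.List.pyRange_one, List.map_map]
  apply List.ext_getElem
  · simp; omega
  · intro i h1 h2
    simp only [List.getElem_take, List.getElem_drop, List.getElem_map, List.getElem_range,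
      Function.comp]
    rw [List.getD_eq_getElem]
    · congr 1; omega
    · simp at h1 ⊢; omega

theorem sum_map_zero_of (l : List Int) (f : Int → Int) (h : ∀ t ∈ l, f t = 0) :
    (l.map f).sum = 0 := by
  apply List.sum_eq_zero
  intro x hx
  obtain ⟨t, ht, rfl⟩ := List.mem_map.mp hx
  exact h t ht

-- a sum of terms guarded by 0 ≤ t < c over [lo, hi) is the unguarded sum over the clipped window
theorem clip_sum (lo hi c : Int) (hc : 0 ≤ c) (g : Int → Int) :
    ((PySem.List.pyRange lo hi 1).map (fun t => if 0 ≤ t ∧ t < c then g t else 0)).sum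
      = ((PySem.List.pyRange (max 0 lo) (min c (max 0 hi)) 1).map g).sum := by
  by_cases hne : lo < hi ∧ 0 < hi ∧ lo < c
  · obtain ⟨h1, h2, h3⟩ := hne
    set a := max 0 lo with hadef
    set b := min c hi with hbdef
    have hb' : min c (max 0 hi) = b := by omega
    have hA : ((PySem.List.pyRange lo a 1).map (fun t => if 0 ≤ t ∧ t < c then g t else 0)).sum = 0 := by
      apply sum_map_zero_of
      intro t ht
      rw [PySem.List.mem_pyRange_one] at ht
      rw [if_neg]; omega
    have hC : ((PySem.List.pyRange b hi 1).map (fun t => if 0 ≤ t ∧ t < c then g t else 0)).sum = 0 := by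
      apply sum_map_zero_of
      intro t ht
      rw [PySem.List.mem_pyRange_one] at ht
      rw [if_neg]; omega
    have hB : (PySem.List.pyRange a b 1).map (fun t => if 0 ≤ t ∧ t < c then g t else 0)
        = (PySem.List.pyRange a b 1).map g := by
      apply List.map_congr_left
      intro t ht
      rw [PySem.List.mem_pyRange_one] at ht
      rw [if_pos]; omega
    rw [hb', PySem.List.pyRange_one_append lo a hi (by omega) (by omega),
        PySem.List.pyRange_one_append a b hi (by omega) (by omega),
        List.map_append, List.map_append, List.sum_append, List.sum_append, hA, hC, hB]
    ring
  · have hL : ((PySem.List.pyRange lo hi 1).map (fun t => if 0 ≤ t ∧ t < c then g t else 0)).sum = 0 := by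
      apply sum_map_zero_of
      intro t ht
      rw [PySem.List.mem_pyRange_one] at ht
      rw [if_neg]; omega
    have hR : PySem.List.pyRange (max 0 lo) (min c (max 0 hi)) 1 = [] := by
      apply PySem.List.pyRange_one_eq_nil; omega
    rw [hL, hR]; rfl

-- one guarded accumulation step of A's inner loop, as "accumulator + guarded cell value"
theorem a_step (dataset : List (List Int)) (cols rows xi yj t : Int) :
    (if 0 ≤ xi ∧ xi < cols ∧ 0 ≤ yj ∧ yj < rows then
        t + PySem.List.pyGetD (PySem.List.pyGetD dataset yj []) xi 0 else t)
      = t + (if 0 ≤ yj ∧ yj < rows then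
          (if 0 ≤ xi ∧ xi < cols then ((dataset.getD yj.toNat []).getD xi.toNat 0) else 0)
        else 0) := by
  by_cases hr : 0 ≤ yj ∧ yj < rows
  · by_cases hc2 : 0 ≤ xi ∧ xi < cols
    · rw [if_pos ⟨hc2.1, hc2.2, hr.1, hr.2⟩, if_pos hr, if_pos hc2]
      congr 1
      have e1 : yj = ((yj.toNat : ℕ) : Int) := by omega
      have e2 : xi = ((xi.toNat : ℕ) : Int) := by omega
      rw [e1, e2, PySem.List.pyGetD_natCast, PySem.List.pyGetD_natCast]
      simp only [Int.toNat_natCast]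
    · rw [if_neg (by tauto), if_pos hr, if_neg hc2, add_zero]
  · rw [if_neg (by tauto), if_neg hr, add_zero]

theorem pyRange3 (z : Int) : PySem.List.pyRange (z - 1) (z + 2) 1 = [z - 1, z, z + 1] := by
  rw [PySem.List.pyRange_one_cons (by omega), show z - 1 + 1 = z from by ring,
      PySem.List.pyRange_one_cons (by omega),
      PySem.List.pyRange_one_cons (by omega), show z + 1 + 1 = z + 2 from by ring,
      PySem.List.pyRange_one_eq_nil (by omega)]

theorem getElem_idx_mem_zipIdx {α : Type} (l : List α) (i : Nat) (h : i < l.length) :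
    (l[i], i) ∈ l.zipIdx := by
  have hl : i < (l.zipIdx 0).length := by simp [h]
  have h2 := List.getElem_zipIdx (l := l) (j := 0) hl
  rw [Nat.zero_add] at h2
  rw [← h2]
  exact List.getElem_mem hl

theorem checkNeighboor_eq_alt (dataset : List (List Int)) (x : Int) (y : Int)
    (_hne : dataset ≠ [])
    (hrag : ∀ p ∈ dataset.zipIdx,
      (y - 1 ≤ (p.2 : Int) ∧ (p.2 : Int) ≤ y + 1 ∧
        max 0 (x - 1) < min ((dataset.headD []).length : Int) (max 0 (x + 2))) →
      min ((dataset.headD []).length : Int) (max 0 (x + 2)) ≤ (p.1.length : Int)) :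
    checkNeighboor dataset x y = checkNeighboor_alt dataset x y := by
  unfold checkNeighboor checkNeighboor_alt
  have hr3 : PySem.List.pyRange (-1) 2 1 = [-1, 0, 1] := by decide
  simp only [hr3, List.foldl, a_step]
  rw [slice_eq_map_pyRange dataset [] _ _ (by omega) (by omega) (by omega)]
  rw [PySem.List.foldl_add, zero_add, List.map_map]
  rw [List.map_congr_left (l := PySem.List.pyRange (max 0 (y - 1)) (min (↑dataset.length) (max 0 (y + 2))) 1)
    (g := fun t => ((PySem.List.pyRange (x - 1) (x + 2) 1).map
        (fun s => if 0 ≤ s ∧ s < ((dataset.headD []).length : Int) then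
            (dataset.getD t.toNat []).getD s.toNat 0 else 0)).sum)
    (fun t ht => by
      rw [PySem.List.mem_pyRange_one] at ht
      simp only [Function.comp_apply]
      have hlt : t.toNat < dataset.length := by omega
      have hgetD : dataset.getD t.toNat [] = dataset[t.toNat] := List.getD_eq_getElem _ _ hlt
      by_cases hxw : max 0 (x - 1) < min ((dataset.headD []).length : Int) (max 0 (x + 2))
      · have hcl := hrag _ (getElem_idx_mem_zipIdx dataset t.toNat hlt) ⟨by omega, by omega, hxw⟩
        rw [← List.sum_eq_foldl,
          slice_eq_map_pyRange (dataset.getD t.toNat []) 0 _ _ (by omega) (by omega)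
            (by rw [hgetD]; exact hcl)]
        exact (clip_sum (x - 1) (x + 2) _ (by omega) _).symm
      · rw [← List.sum_eq_foldl, PySem.List.slice_toNat _ (by omega) (by omega),
          show (min ((dataset.headD []).length : Int) (max 0 (x + 2))).toNat
              - (max 0 (x - 1)).toNat = 0 from by omega]
        simp only [List.take_zero, List.sum_nil]
        exact (sum_map_zero_of _ _ (fun s hs => by
          rw [PySem.List.mem_pyRange_one] at hs
          rw [if_neg]; omega)).symm)]
  rw [← clip_sum (y - 1) (y + 2) (dataset.length : Int) (by omega)]
  simp only [pyRange3, List.map_cons, List.map_nil, List.sum_cons, List.sum_nil,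
    show y + -1 = y - 1 from by ring, show x + -1 = x - 1 from by ring, add_zero]
  split_ifs <;> ring

-- ===== VERDICT (by name: the statement is the Claim_ definition above) =====
theorem checkNeighboor_spec : Claim_equal_checkNeighboor := by
  intro dataset x y _hdom hpre
  unfold Spec_checkNeighboor
  exact checkNeighboor_eq_alt dataset x y hpre.1 hpre.2
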